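-- pv_equiv track=rewrite | github.com/griquelme/tidyms | tidyms/simulation.py | _make_batch_sample_block
-- ===== SOURCE A (Python) =====
-- def _make_batch_sample_block(classes, batch_perm_index,
--                              qc_bracket_size):
--     classes_rand = list()
--     for k, ind in enumerate(batch_perm_index):
--
--         if ((k % qc_bracket_size) == 0) and k > 0:
--             classes_rand.append("QC")
--         classes_rand.append(classes[ind])
--     return classes_rand
-- ===== SOURCE B (Python) =====
-- def _make_batch_sample_block(classes, batch_perm_index, qc_bracket_size):
--     classes_rand = []
--     for i in range(0, len(batch_perm_index), qc_bracket_size):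
--         if i > 0:
--             classes_rand.append("QC")
--         for ind in batch_perm_index[i:i + qc_bracket_size]:
--             classes_rand.append(classes[ind])
--     return classes_rand
-- ===== Notes on version B (the rewrite author's own statement) =====
-- stated objective: alternative
-- what changed: B walks batch_perm_index in chunks of qc_bracket_size (outer range-with-step loop, inner extend of the slice), prepending 'QC' before each chunk but the first, instead of A's per-element modulo counter.
-- outside the precondition, e.g. on _make_batch_sample_block(['a'], [0, 0, 0], -2): A returns ['a', 'a', 'QC', 'a'], B returns []; on _make_batch_sample_block([], [], 0): A returns [], B raises ValueError
import Mathlib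
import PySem

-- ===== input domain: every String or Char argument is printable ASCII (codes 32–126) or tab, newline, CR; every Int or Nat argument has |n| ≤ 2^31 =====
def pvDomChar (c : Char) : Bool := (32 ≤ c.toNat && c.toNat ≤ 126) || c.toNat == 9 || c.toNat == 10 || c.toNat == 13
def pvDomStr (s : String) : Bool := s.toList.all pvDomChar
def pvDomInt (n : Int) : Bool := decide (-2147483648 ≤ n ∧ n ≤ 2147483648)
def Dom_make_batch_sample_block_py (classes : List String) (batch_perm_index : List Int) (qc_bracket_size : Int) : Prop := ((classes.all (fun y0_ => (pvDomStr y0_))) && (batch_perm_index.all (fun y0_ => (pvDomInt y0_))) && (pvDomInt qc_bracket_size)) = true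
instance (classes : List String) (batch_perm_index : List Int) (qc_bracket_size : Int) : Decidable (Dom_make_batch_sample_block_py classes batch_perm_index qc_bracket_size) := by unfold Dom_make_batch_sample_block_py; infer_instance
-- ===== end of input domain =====

-- B chunks the index list by qc_bracket_size instead of keeping A's per-element modulo counter; equivalence is claimed for positive bracket sizes and in-range indices (return value only, no mutation involved).

-- ===== PORT A =====
-- A: for k, ind in enumerate(batch_perm_index): if k % q == 0 and k > 0: append "QC"; append classes[ind]
def make_batch_sample_block_py (classes : List String) (batch_perm_index : List Int) (qc_bracket_size : Int) : List String :=
  (PySem.List.enumerate batch_perm_index 0).foldl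
    (fun acc p =>
      (if PySem.Int.mod p.1 qc_bracket_size = 0 ∧ p.1 > 0 then acc ++ ["QC"] else acc)
        ++ [PySem.List.pyGetD classes p.2 ""])
    []

-- ===== PORT B =====
-- B's outer loop `for i in range(0, len, q)` as chunk recursion: each step emits "QC"
-- (except before the first chunk), then the classes of the next q indices.
def altChunks (classes : List String) (qm1 : Nat) (rest : List Int) (first : Bool) : List String :=
  match rest with
  | [] => []
  | x :: xs =>
      (if first then [] else ["QC"]) ++
      ((x :: xs).take (qm1 + 1)).map (fun ind => PySem.List.pyGetD classes ind "") ++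
      altChunks classes qm1 ((x :: xs).drop (qm1 + 1)) false
  termination_by rest.length
  decreasing_by simp

def make_batch_sample_block_py_alt (classes : List String) (batch_perm_index : List Int) (qc_bracket_size : Int) : List String :=
  -- range(0, n, q) is empty for q < 0 (Source B then returns []); q = 0 raises (outside Pre_)
  if qc_bracket_size ≤ 0 then []
  else altChunks classes (qc_bracket_size.toNat - 1) batch_perm_index true

-- ===== PRECONDITION & SPEC =====
-- Pre_ excludes non-positive bracket sizes (q = 0 raises in A on non-empty input and in B always;
-- for q < 0, A's "QC every |q|" comes from Python's sign-of-divisor modulo and B's empty range returns [],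
-- an unspecified corner) and out-of-range indices (A raises IndexError).
def Pre_make_batch_sample_block_py (classes : List String) (batch_perm_index : List Int) (qc_bracket_size : Int) : Prop :=
  0 < qc_bracket_size ∧ ∀ i ∈ batch_perm_index, PySem.Raise.InRange classes.length i
instance (classes : List String) (batch_perm_index : List Int) (qc_bracket_size : Int) : Decidable (Pre_make_batch_sample_block_py classes batch_perm_index qc_bracket_size) := by unfold Pre_make_batch_sample_block_py; infer_instance

def pvWitness_make_batch_sample_block_py : List String × List Int × Int := (["a", "b"], [0, 1, -1, 0, 1], 2)

def Spec_make_batch_sample_block_py (classes : List String) (batch_perm_index : List Int) (qc_bracket_size : Int) (out : List String) : Prop := out = make_batch_sample_block_py_alt classes batch_perm_index qc_bracket_size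
instance (classes : List String) (batch_perm_index : List Int) (qc_bracket_size : Int) (out : List String) : Decidable (Spec_make_batch_sample_block_py classes batch_perm_index qc_bracket_size out) := by unfold Spec_make_batch_sample_block_py; infer_instance

-- ===== CLAIM (what is proved, stated in full; the proofs are below) =====
def Claim_equal_make_batch_sample_block_py : Prop := ∀ (classes : List String) (batch_perm_index : List Int) (qc_bracket_size : Int), Dom_make_batch_sample_block_py classes batch_perm_index qc_bracket_size → Pre_make_batch_sample_block_py classes batch_perm_index qc_bracket_size → Spec_make_batch_sample_block_py classes batch_perm_index qc_bracket_size (make_batch_sample_block_py classes batch_perm_index qc_bracket_size)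

-- ===== LEMMAS AND PROOFS =====

-- A as a flatMap over the enumeration
theorem portA_eq_flatMap (classes : List String) (bpi : List Int) (q : Int) :
    make_batch_sample_block_py classes bpi q =
      (PySem.List.enumerate bpi 0).flatMap
        (fun p => (if PySem.Int.mod p.1 q = 0 ∧ p.1 > 0 then ["QC"] else []) ++
                  [PySem.List.pyGetD classes p.2 ""]) := by
  unfold make_batch_sample_block_py
  rw [show (fun (acc : List String) (p : Int × Int) =>
        (if PySem.Int.mod p.1 q = 0 ∧ p.1 > 0 then acc ++ ["QC"] else acc)
          ++ [PySem.List.pyGetD classes p.2 ""]) =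
      (fun acc p => acc ++ ((if PySem.Int.mod p.1 q = 0 ∧ p.1 > 0 then ["QC"] else []) ++
          [PySem.List.pyGetD classes p.2 ""])) from by
    funext acc p; split_ifs <;> simp]
  exact PySem.List.foldl_append_eq_flatMap _ _ _

-- inside a chunk, positions strictly between multiples of q never get a "QC"
theorem noQC (classes : List String) (q : Int) (hq : 0 < q) :
    ∀ (xs : List Int) (s r : Nat), q ∣ (s : Int) → 0 < r → (r : Int) + xs.length ≤ q →
      (PySem.List.enumerate xs ((s : Int) + r)).flatMap
        (fun p => (if PySem.Int.mod p.1 q = 0 ∧ p.1 > 0 then ["QC"] else []) ++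
                  [PySem.List.pyGetD classes p.2 ""]) =
      xs.map (fun ind => PySem.List.pyGetD classes ind "") := by
  intro xs
  induction xs with
  | nil => intro s r _ _ _; simp [PySem.List.enumerate]
  | cons x xs ih =>
      intro s r hdvd hr hle
      rw [PySem.List.enumerate_cons]
      simp only [List.flatMap_cons, List.map_cons]
      have hnd : ¬ (PySem.Int.mod ((s : Int) + r) q = 0 ∧ (s : Int) + r > 0) := by
        rintro ⟨h0, -⟩
        rw [PySem.Int.mod_eq_zero_iff_dvd] at h0
        have : q ∣ (r : Int) := (Int.dvd_add_right hdvd).mp h0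
        have := Int.le_of_dvd (by exact_mod_cast hr) this
        simp at hle; omega
      rw [if_neg hnd]
      have : (s : Int) + r + 1 = (s : Int) + ((r + 1 : Nat) : Int) := by push_cast; ring
      rw [this, ih s (r + 1) hdvd (by omega) (by simp at hle ⊢; push_cast; omega)]
      simp

theorem mainLemma (classes : List String) (q : Int) (hq : 0 < q) :
    ∀ (n : Nat) (rest : List Int) (s : Nat), rest.length ≤ n → q ∣ (s : Int) →
      (PySem.List.enumerate rest (s : Int)).flatMap
        (fun p => (if PySem.Int.mod p.1 q = 0 ∧ p.1 > 0 then ["QC"] else []) ++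
                  [PySem.List.pyGetD classes p.2 ""]) =
      altChunks classes (q.toNat - 1) rest (decide (s = 0)) := by
  intro n
  induction n with
  | zero =>
      intro rest s hlen _
      have : rest = [] := List.eq_nil_of_length_eq_zero (by omega)
      subst this; simp [altChunks, PySem.List.enumerate]
  | succ n ih =>
      intro rest s hlen hdvd
      match rest with
      | [] => simp [altChunks, PySem.List.enumerate]
      | x :: xs =>
          have hq1 : q.toNat - 1 + 1 = q.toNat := by omega
          rw [altChunks]
          rw [PySem.List.enumerate_cons]
          simp only [List.flatMap_cons]
          have hmods : PySem.Int.mod (s : Int) q = 0 := (PySem.Int.mod_eq_zero_iff_dvd _ _).mpr hdvd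
          have hpref : (if PySem.Int.mod (s:Int) q = 0 ∧ (s:Int) > 0 then ["QC"] else []) =
              (if decide (s = 0) = true then [] else ["QC"]) := by
            by_cases h0 : s = 0 <;> simp [h0, hmods] <;> omega
          rw [hpref, hq1]
          -- split the tail at q.toNat - 1
          have hsplit : xs = xs.take (q.toNat - 1) ++ xs.drop (q.toNat - 1) := (List.take_append_drop _ _).symm
          conv_lhs => rw [hsplit]
          rw [PySem.List.enumerate_append, List.flatMap_append]
          have hcast : (s : Int) + 1 + ((xs.take (q.toNat - 1)).length : Int) =
              (s : Int) + (((1 + (xs.take (q.toNat - 1)).length : Nat)) : Int) := by push_cast; ring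
          have htakelen : (xs.take (q.toNat - 1)).length ≤ q.toNat - 1 := by
            simp [List.length_take]
          have hnoqc := noQC classes q hq (xs.take (q.toNat - 1)) s 1 hdvd (by omega)
            (by push_cast; omega)
          have h1 : (s : Int) + 1 = (s : Int) + ((1 : Nat) : Int) := by norm_num
          rw [h1, hnoqc]
          by_cases hbig : xs.length ≤ q.toNat - 1
          · -- whole rest fits in one chunk
            have hdropnil : xs.drop (q.toNat - 1) = [] := List.drop_eq_nil_of_le hbig
            have htake : xs.take (q.toNat - 1) = xs := List.take_of_length_le hbig
            have ht1 : List.take q.toNat (x :: xs) = x :: xs.take (q.toNat - 1) := by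
              rw [show q.toNat = (q.toNat - 1) + 1 from by omega]; rfl
            have hd1 : List.drop q.toNat (x :: xs) = xs.drop (q.toNat - 1) := by
              rw [show q.toNat = (q.toNat - 1) + 1 from by omega]; rfl
            rw [ht1, hd1, hdropnil, htake]
            simp [altChunks, PySem.List.enumerate]
          · push_neg at hbig
            have htake' : (xs.take (q.toNat - 1)).length = q.toNat - 1 := by
              simp [List.length_take]; omega
            have hdvd' : q ∣ ((s + q.toNat : Nat) : Int) := by
              push_cast [Int.toNat_of_nonneg hq.le]
              exact dvd_add hdvd dvd_rfl
            have hrec := ih (xs.drop (q.toNat - 1)) (s + q.toNat)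
              (by simp [List.length_drop] at hlen ⊢; omega) hdvd'
            have hs' : decide (s + q.toNat = 0) = false := by
              simp; omega
            rw [hs'] at hrec
            have hcast2 : (s : Int) + ((1 : Nat) : Int) + ((xs.take (q.toNat - 1)).length : Int) = ((s + q.toNat : Nat) : Int) := by
              rw [htake']; push_cast; omega
            rw [hcast2, hrec]
            have hd1 : List.drop q.toNat (x :: xs) = xs.drop (q.toNat - 1) := by
              rw [show q.toNat = (q.toNat - 1) + 1 from by omega]; rfl
            have ht1 : List.take q.toNat (x :: xs) = x :: xs.take (q.toNat - 1) := by
              rw [show q.toNat = (q.toNat - 1) + 1 from by omega]; rfl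
            rw [hd1, ht1]
            simp

theorem make_batch_sample_block_py_spec : Claim_equal_make_batch_sample_block_py := by
  intro classes bpi q _ hpre
  unfold Spec_make_batch_sample_block_py
  obtain ⟨hq, -⟩ := hpre
  rw [portA_eq_flatMap]
  unfold make_batch_sample_block_py_alt
  rw [if_neg (by omega)]
  have := mainLemma classes q hq bpi.length bpi 0 le_rfl (by simp)
  simpa using this
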